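-- pv_equiv track=rewrite | github.com/rnat697/HandwrittenCharactersAndDigitRecogniser | software/scripts/imageViewerGUI.py | findAssociatedLabel
-- ===== SOURCE A (Python) =====
-- def findAssociatedLabel(findChar):
-- # To find the associated Label number by comparing the index of charArray in order to filter
-- # Returns the label number (from the index number of the array) associated to the letter/digit
--     charArray = ["0","1","2","3","4","5","6","7","8","9",
--                 "A","B","C","D","E","F","G","H","I","J","K","L","M","N","O","P","Q","R","S","T","U","V","W","X","Y","Z",
--                 "a","b","c","d","e","f","g","h","i","j","k","l","m","n","o","p","q","r","s","t","u","v","w","x","y","z"]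
--
--     for index in range (len(charArray)):
--         if (charArray[index] == findChar):
--             return index
--             break
-- ===== SOURCE B (Python) =====
-- def findAssociatedLabel(findChar):
--     # Closed-form: index computed from the code point instead of scanning the array.
--     if not isinstance(findChar, str) or len(findChar) != 1:
--         return None
--     o = ord(findChar)
--     if 48 <= o <= 57:      # '0'-'9'
--         return o - 48
--     if 65 <= o <= 90:      # 'A'-'Z'
--         return o - 65 + 10
--     if 97 <= o <= 122:     # 'a'-'z'
--         return o - 97 + 36
--     return None
-- ===== Notes on version B (the rewrite author's own statement) =====
-- stated objective: simpler
-- what changed: Replaced the linear scan over a 62-element character array with a closed-form index computed from the character's code point (ord arithmetic with three range checks).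
import Mathlib
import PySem

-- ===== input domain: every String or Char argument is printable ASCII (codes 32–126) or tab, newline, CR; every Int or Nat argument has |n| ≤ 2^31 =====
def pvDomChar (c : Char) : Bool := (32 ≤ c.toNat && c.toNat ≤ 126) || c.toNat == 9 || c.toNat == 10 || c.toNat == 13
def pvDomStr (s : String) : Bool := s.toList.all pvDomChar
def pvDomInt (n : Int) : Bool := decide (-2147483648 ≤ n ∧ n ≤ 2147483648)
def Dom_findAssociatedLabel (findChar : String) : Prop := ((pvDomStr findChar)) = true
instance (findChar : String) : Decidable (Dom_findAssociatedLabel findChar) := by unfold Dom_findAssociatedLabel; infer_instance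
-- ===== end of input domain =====

-- B replaces A's linear scan over the fixed 62-character array with a closed-form
-- index computed from the character's code point (simpler, constant work).


-- ===== PORT A =====
def pvCharArray : List String :=
  ["0","1","2","3","4","5","6","7","8","9",
   "A","B","C","D","E","F","G","H","I","J","K","L","M","N","O","P","Q","R","S","T","U","V","W","X","Y","Z",
   "a","b","c","d","e","f","g","h","i","j","k","l","m","n","o","p","q","r","s","t","u","v","w","x","y","z"]

-- 'for index in range(len(charArray)): if charArray[index] == findChar: return index' — first match wins, fall off the end = None
def pvScan (findChar : String) : List String → Int → Option Int
  | [], _ => none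
  | x :: xs, i => if x = findChar then some i else pvScan findChar xs (i + 1)

def findAssociatedLabel (findChar : String) : Option Int := pvScan findChar pvCharArray 0

-- ===== PORT B =====
def findAssociatedLabel_alt (findChar : String) : Option Int :=
  match findChar.toList with
  | [c] =>
    let o : Int := (c.toNat : Int)
    if 48 ≤ o ∧ o ≤ 57 then some (o - 48)
    else if 65 ≤ o ∧ o ≤ 90 then some (o - 65 + 10)
    else if 97 ≤ o ∧ o ≤ 122 then some (o - 97 + 36)
    else none
  | _ => none

-- ===== PRECONDITION & SPEC =====
def Spec_findAssociatedLabel (findChar : String) (out : Option Int) : Prop := out = findAssociatedLabel_alt findChar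
instance (findChar : String) (out : Option Int) : Decidable (Spec_findAssociatedLabel findChar out) := by unfold Spec_findAssociatedLabel; infer_instance

-- ===== CLAIM (what is proved, stated in full; the proofs are below) =====
def Claim_equal_findAssociatedLabel : Prop := ∀ (findChar : String), Dom_findAssociatedLabel findChar → Spec_findAssociatedLabel findChar (findAssociatedLabel findChar)

-- ===== LEMMAS AND PROOFS =====

-- every element of the char array is a single-character string
theorem pvScan_none_of_len_ne (s : String) (hs : s.toList.length ≠ 1) :
    ∀ (l : List String) (i : Int), (∀ x ∈ l, x.toList.length = 1) → pvScan s l i = none := by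
  intro l
  induction l with
  | nil => intro i _; rfl
  | cons x xs ih =>
    intro i h
    have hx : x ≠ s := by
      intro he
      exact hs (he ▸ h x (List.mem_cons_self))
    simp [pvScan, hx]
    exact ih (i + 1) (fun y hy => h y (List.mem_cons_of_mem _ hy))

-- the single-character case, decided per admissible code point
theorem pv_single_char (c : Char) (hc : c.toNat ≤ 126) :
    findAssociatedLabel (String.ofList [c]) = findAssociatedLabel_alt (String.ofList [c]) := by
  obtain ⟨n, hn, hle⟩ : ∃ n, Char.ofNat n = c ∧ n ≤ 126 := ⟨c.toNat, Char.ofNat_toNat c, hc⟩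
  subst hn
  interval_cases n <;> decide

-- ===== VERDICT (by name: the statement is the Claim_ definition above) =====
theorem findAssociatedLabel_spec : Claim_equal_findAssociatedLabel := by
  intro s hdom
  unfold Spec_findAssociatedLabel
  match hs : s.toList with
  | [c] =>
    have hc : pvDomChar c = true := by
      unfold Dom_findAssociatedLabel pvDomStr at hdom
      simp [hs] at hdom
      exact hdom
    have hle : c.toNat ≤ 126 := by
      simp [pvDomChar] at hc
      omega
    have hsc : s = (String.ofList [c]) := by
      rw [← hs]; exact Eq.symm String.ofList_toList
    rw [hsc]
    exact pv_single_char c hle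
  | [] =>
    have h : s.toList.length ≠ 1 := by simp [hs]
    rw [findAssociatedLabel, pvScan_none_of_len_ne s h pvCharArray 0 (by decide),
      findAssociatedLabel_alt, hs]
  | c :: d :: rest =>
    have h : s.toList.length ≠ 1 := by simp [hs]
    rw [findAssociatedLabel, pvScan_none_of_len_ne s h pvCharArray 0 (by decide),
      findAssociatedLabel_alt, hs]
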